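-- pv_equiv track=rewrite | github.com/Qiskit/qiskit-addon-cutting | circuit_knitting/cutting/cutqc/wire_cutting_evaluation.py | mutate_measurement_basis
-- ===== SOURCE A (Python) =====
-- import itertools
-- from typing import Sequence, Any
--
-- def mutate_measurement_basis(meas: tuple[str, ...]) -> list[tuple[Any, ...]]:
--     """
--     Change of basis for all identity measurements.
--
--     For every identity measurement, it is split into an I and Z measurement.
--     I and Z measurement basis correspond to the same logical circuit.
--
--     Args:
--         meas: The current measurement bases
--
--     Returns:
--         The update measurement bases
--     """
--     if all(x != "I" for x in meas):
--         return [meas]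
--     else:
--         mutated_meas = []
--         for x in meas:
--             if x != "I":
--                 mutated_meas.append([x])
--             else:
--                 mutated_meas.append(["I", "Z"])
--         mutated_meas_out = list(itertools.product(*mutated_meas))
--
--         return mutated_meas_out
-- ===== SOURCE B (Python) =====
-- def mutate_measurement_basis(meas):
--     k = sum(1 for x in meas if x == "I")
--     out = []
--     for i in range(1 << k):
--         b = k
--         row = []
--         for x in meas:
--             if x == "I":
--                 b -= 1
--                 row.append("Z" if (i >> b) & 1 else "I")
--             else:
--                 row.append(x)
--         out.append(tuple(row))
--     return out
-- ===== Notes on version B (the rewrite author's own statement) =====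
-- stated objective: alternative
-- what changed: B enumerates the 2^k assignments by integer bitmask: it counts the identity positions, then for each index i in range(1 << k) decodes i's k bits MSB-first into I/Z while scanning meas once, instead of building per-position option lists and taking an itertools-style Cartesian product (with a separate no-'I' early-return branch).
import Mathlib
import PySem

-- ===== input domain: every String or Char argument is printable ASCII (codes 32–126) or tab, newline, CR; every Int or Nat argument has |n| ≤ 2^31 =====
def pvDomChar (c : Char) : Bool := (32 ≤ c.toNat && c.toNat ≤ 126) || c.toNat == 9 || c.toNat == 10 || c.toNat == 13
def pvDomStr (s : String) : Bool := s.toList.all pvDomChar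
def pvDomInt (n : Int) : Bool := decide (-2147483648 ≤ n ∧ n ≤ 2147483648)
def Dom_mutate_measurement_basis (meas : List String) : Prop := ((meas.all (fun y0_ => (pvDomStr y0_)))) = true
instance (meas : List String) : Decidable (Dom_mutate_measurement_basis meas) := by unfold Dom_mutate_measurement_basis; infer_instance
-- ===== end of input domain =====

-- B enumerates the 2^k basis assignments by integer bitmask, decoding each index's bits MSB-first into I/Z while scanning meas once, instead of building per-position option lists and taking an itertools-style Cartesian product; objective: alternative.


-- ===== PORT A =====
-- itertools.product over a list of option lists (rightmost varies fastest), exact port of list(itertools.product(*mutated_meas))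
def pyProduct (ls : List (List String)) : List (List String) :=
  match ls with
  | [] => [[]]
  | l :: rest => l.flatMap (fun a => (pyProduct rest).map (fun r => a :: r))

def mutate_measurement_basis (meas : List String) : List (List String) :=
  if meas.all (fun x => x != "I") then [meas]
  else
    let mutated_meas := meas.foldl (fun acc x => acc ++ [if x != "I" then [x] else ["I", "Z"]]) []
    pyProduct mutated_meas

-- ===== PORT B =====
-- bitmask enumeration: k = number of "I"s; for each i in range(1 << k) decode i's k bits
-- MSB-first into "I"/"Z" at the identity positions in one scan of meas (state = (b, row))
def mutate_measurement_basis_alt (meas : List String) : List (List String) :=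
  let k := (meas.filter (fun x => x == "I")).length
  (List.range (1 <<< k)).map (fun i =>
    (meas.foldl (fun (st : Nat × List String) x =>
      if x == "I" then
        (st.1 - 1, st.2 ++ [if (i >>> (st.1 - 1)) &&& 1 == 1 then "Z" else "I"])
      else (st.1, st.2 ++ [x])) (k, [])).2)

-- ===== PRECONDITION & SPEC =====
def Spec_mutate_measurement_basis (meas : List String) (out : List (List String)) : Prop := out = mutate_measurement_basis_alt meas
instance (meas : List String) (out : List (List String)) : Decidable (Spec_mutate_measurement_basis meas out) := by unfold Spec_mutate_measurement_basis; infer_instance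

-- ===== CLAIM (what is proved, stated in full; the proofs are below) =====
def Claim_equal_mutate_measurement_basis : Prop := ∀ (meas : List String), Dom_mutate_measurement_basis meas → Spec_mutate_measurement_basis meas (mutate_measurement_basis meas)

-- ===== LEMMAS AND PROOFS =====

-- one option list per symbol, as A builds them
def optList (x : String) : List String := if x == "I" then ["I", "Z"] else [x]

-- the k bits of i, MSB first, rendered as "I"/"Z"
def bitsIZ (i : Nat) : Nat → List String
  | 0 => []
  | b + 1 => (if (i >>> b) &&& 1 == 1 then "Z" else "I") :: bitsIZ i b

-- substitute successive elements of cs for the "I"s of meas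
def substI : List String → List String → List String
  | [], _ => []
  | x :: xs, cs => if x == "I" then cs.headD "I" :: substI xs cs.tail else x :: substI xs cs

-- all I/Z tuples of length k, leftmost slowest (the order of itertools.product)
def tupsIZ : Nat → List (List String)
  | 0 => [[]]
  | k + 1 => ["I", "Z"].flatMap (fun a => (tupsIZ k).map (a :: ·))

def countI (meas : List String) : Nat := (meas.filter (fun x => x == "I")).length

lemma foldlA_eq_map (meas : List String) :
    meas.foldl (fun acc x => acc ++ [if x != "I" then [x] else ["I", "Z"]]) [] = meas.map optList := by
  rw [PySem.List.foldl_append_singleton_eq_map]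
  exact List.map_congr_left (fun x _ => by by_cases h : x = "I" <;> simp [optList, h])

-- A side: the Cartesian product is the substitution image of all I/Z tuples
lemma product_eq_subst (meas : List String) :
    pyProduct (meas.map optList) = (tupsIZ (countI meas)).map (substI meas) := by
  induction meas with
  | nil => simp [pyProduct, tupsIZ, countI, substI]
  | cons x xs ih =>
    by_cases h : x = "I"
    · subst h
      simp only [List.map_cons, pyProduct, ih, countI, List.filter_cons]
      simp [optList, tupsIZ, substI, List.flatMap_cons, List.map_map, Function.comp_def]
    · simp only [List.map_cons, pyProduct, ih, countI, List.filter_cons]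
      simp [optList, h, substI, List.map_map, Function.comp_def]

-- bits below position k are unchanged by adding 2^k
lemma shift_and_add_pow (k j m : Nat) (hm : m < k) :
    ((j + 2 ^ k) >>> m) &&& 1 = (j >>> m) &&& 1 := by
  simp only [Nat.and_one_is_mod, Nat.shiftRight_eq_div_pow]
  have h1 : 2 ^ k = 2 ^ m * 2 ^ (k - m) := by rw [← pow_add]; congr 1; omega
  rw [h1, Nat.add_mul_div_left _ _ (Nat.two_pow_pos m)]
  have h2 : 2 ^ (k - m) % 2 = 0 := by
    have h3 : k - m = (k - m - 1) + 1 := by omega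
    rw [h3, pow_succ]; simp
  omega

lemma bitsIZ_add_pow (k j b : Nat) (hb : b ≤ k) : bitsIZ (j + 2 ^ k) b = bitsIZ j b := by
  induction b with
  | zero => rfl
  | succ b ihb => simp [bitsIZ, shift_and_add_pow k j b (by omega), ihb (by omega)]

-- the bitmask enumeration lists exactly the I/Z tuples, in product order
lemma range_bits_eq_tups (k : Nat) : (List.range (2 ^ k)).map (fun i => bitsIZ i (k)) = tupsIZ k := by
  induction k with
  | zero => simp [bitsIZ, tupsIZ]
  | succ k ih =>
    have hsplit : 2 ^ (k + 1) = 2 ^ k + 2 ^ k := by ring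
    rw [hsplit, List.range_add, List.map_append, List.map_map]
    have h1 : (List.range (2 ^ k)).map (fun i => bitsIZ i (k + 1))
        = (tupsIZ k).map ("I" :: ·) := by
      rw [← ih, List.map_map]
      refine List.map_congr_left (fun j hj => ?_)
      have hjlt : j < 2 ^ k := List.mem_range.mp hj
      have h0 : (j >>> k) &&& 1 = 0 := by
        simp [Nat.shiftRight_eq_div_pow, Nat.div_eq_of_lt hjlt]
      simp [bitsIZ, h0]
    have h2 : (List.range (2 ^ k)).map ((fun i => bitsIZ i (k + 1)) ∘ (fun x => 2 ^ k + x))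
        = (tupsIZ k).map ("Z" :: ·) := by
      rw [← ih, List.map_map]
      refine List.map_congr_left (fun j hj => ?_)
      have hjlt : j < 2 ^ k := List.mem_range.mp hj
      have h1' : ((j + 2 ^ k) >>> k) % 2 = 1 := by
        simp only [Nat.shiftRight_eq_div_pow]
        rw [Nat.div_eq_sub_div (Nat.two_pow_pos k) (by omega), Nat.add_sub_cancel,
          Nat.div_eq_of_lt hjlt]
      simp [Nat.add_comm (2 ^ k) j, bitsIZ, h1', bitsIZ_add_pow k j k le_rfl]
    rw [h1, h2]
    simp [tupsIZ, List.map_eq_flatMap]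

-- B's inner scan computes the substitution of the current index's remaining bits
lemma foldlB_loop (i : Nat) (meas : List String) :
    ∀ (b : Nat) (acc : List String), countI meas ≤ b →
    (meas.foldl (fun (st : Nat × List String) x =>
      if x == "I" then
        (st.1 - 1, st.2 ++ [if (i >>> (st.1 - 1)) &&& 1 == 1 then "Z" else "I"])
      else (st.1, st.2 ++ [x])) (b, acc))
      = (b - countI meas, acc ++ substI meas (bitsIZ i b)) := by
  induction meas with
  | nil => intro b acc _; simp [countI, substI]
  | cons x xs ih =>
    intro b acc hle
    by_cases h : x = "I"
    · subst h
      have hcnt : countI ("I" :: xs) = countI xs + 1 := by simp [countI]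
      rw [hcnt] at hle
      obtain ⟨b', rfl⟩ : ∃ b', b = b' + 1 := ⟨b - 1, by omega⟩
      simp only [List.foldl_cons, beq_self_eq_true, if_true, Nat.add_sub_cancel]
      rw [ih b' _ (by omega), hcnt]
      simp only [bitsIZ, substI, beq_self_eq_true, if_true, List.headD_cons, List.tail_cons,
        Prod.mk.injEq]
      exact ⟨by omega, by simp⟩
    · have hcnt : countI (x :: xs) = countI xs := by simp [countI, h]
      have hx : (x == "I") = false := by simpa using h
      simp only [List.foldl_cons, hx, Bool.false_eq_true, if_false]
      rw [ih b _ (hcnt ▸ hle), hcnt]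
      simp [substI, hx]

-- with no "I", substitution is the identity
lemma substI_no_I (meas : List String) (h : meas.all (fun x => x != "I") = true) (cs : List String) :
    substI meas cs = meas := by
  induction meas generalizing cs with
  | nil => rfl
  | cons x xs ih =>
    simp only [List.all_cons, Bool.and_eq_true] at h
    have hx : (x == "I") = false := by simpa using h.1
    simp [substI, hx, ih h.2]

lemma alt_eq_subst (meas : List String) :
    mutate_measurement_basis_alt meas = (tupsIZ (countI meas)).map (substI meas) := by
  simp only [mutate_measurement_basis_alt]
  have hcnt : (List.filter (fun x => x == "I") meas).length = countI meas := rfl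
  rw [hcnt, Nat.one_shiftLeft]
  rw [← range_bits_eq_tups, List.map_map]
  refine List.map_congr_left (fun i _ => ?_)
  rw [foldlB_loop i meas (countI meas) [] le_rfl]
  simp

lemma spec_aux (meas : List String) :
    Spec_mutate_measurement_basis meas (mutate_measurement_basis meas) := by
  unfold Spec_mutate_measurement_basis
  rw [alt_eq_subst]
  unfold mutate_measurement_basis
  split
  · next h =>
    have hk : countI meas = 0 := by
      simp only [countI, List.length_eq_zero_iff, List.filter_eq_nil_iff]
      intro x hx
      have := List.all_eq_true.mp h x hx
      simpa using this
    rw [hk]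
    simp [tupsIZ, substI_no_I meas h]
  · rw [foldlA_eq_map, product_eq_subst]

-- ===== VERDICT (by name: the statement is the Claim_ definition above) =====
theorem mutate_measurement_basis_spec : Claim_equal_mutate_measurement_basis := by
  intro meas _
  exact spec_aux meas
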